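-- pv_equiv track=rewrite | github.com/leeyeezeee/benchfortir | src/evaluator.py | count_valid_tags
-- ===== SOURCE A (Python) =====
-- def count_valid_tags(text: str, tag: str) -> int:
--     """Count valid paired tags like <tag> ... </tag>."""
--     if not text:
--         return 0
--
--     count = 0
--     current_pos = 0
--     start_tag = f"<{tag}>"
--     end_tag = f"</{tag}>"
--
--     while True:
--         start_pos = text.find(start_tag, current_pos)
--         if start_pos == -1:
--             break
--         end_pos = text.find(end_tag, start_pos + len(start_tag))
--         if end_pos == -1:
--             break
--         count += 1
--         current_pos = end_pos + len(end_tag)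
--
--     return count
-- ===== SOURCE B (Python) =====
-- def count_valid_tags(text: str, tag: str) -> int:
--     """Count valid paired tags like <tag> ... </tag>."""
--     start_tag = f"<{tag}>"
--     end_tag = f"</{tag}>"
--     count = 0
--     pos = 0
--     want_end = False
--     n = len(text)
--     while pos < n:
--         token = end_tag if want_end else start_tag
--         if text.startswith(token, pos):
--             if want_end:
--                 count += 1
--             want_end = not want_end
--             pos += len(token)
--         else:
--             pos += 1
--     return count
-- ===== Notes on version B (the rewrite author's own statement) =====
-- stated objective: alternative
-- what changed: A repeatedly calls str.find to jump between tag occurrences; B makes one left-to-right character scan with a seeking-start/seeking-end state flag, testing startswith(token, pos) at each position.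
import Mathlib
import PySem

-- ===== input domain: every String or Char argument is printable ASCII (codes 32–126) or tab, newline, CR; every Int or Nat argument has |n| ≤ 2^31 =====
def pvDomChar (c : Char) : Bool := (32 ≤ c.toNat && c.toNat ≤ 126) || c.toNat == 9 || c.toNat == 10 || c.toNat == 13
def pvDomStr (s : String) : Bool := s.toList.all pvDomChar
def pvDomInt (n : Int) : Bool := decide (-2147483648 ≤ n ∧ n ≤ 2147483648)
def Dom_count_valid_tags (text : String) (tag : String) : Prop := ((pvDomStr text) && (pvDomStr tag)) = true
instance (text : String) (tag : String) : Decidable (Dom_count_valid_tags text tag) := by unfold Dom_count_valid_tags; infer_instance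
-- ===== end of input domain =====

-- B replaces A's repeated str.find jumps by a single left-to-right character scan that keeps a
-- seeking-start/seeking-end state flag (objective: alternative; no speed claim; both are total).

-- ===== PORT A =====

-- Facts about PySem.Chars.find.go / findFrom, cited by pvLoopA's decreasing_by
-- (they justify termination of A's `while True` loop: each round strictly advances current_pos).

theorem pvGo_first_match {sub : List Char} (l : List Char) (k : Nat)
    (h : PySem.Chars.find.go sub l k ≠ -1) :
    ∃ j : Nat, PySem.Chars.find.go sub l k = ((k + j : Nat) : Int) ∧
      sub.isPrefixOf (l.drop j) = true ∧ ∀ i : Nat, i < j → ¬ sub.isPrefixOf (l.drop i) = true := by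
  induction l generalizing k with
  | nil =>
    simp only [PySem.Chars.find.go] at h ⊢
    by_cases he : sub.isEmpty = true
    · exact ⟨0, by simp [he], by simp [List.isEmpty_iff.mp he], by omega⟩
    · simp [he] at h
  | cons c t ih =>
    simp only [PySem.Chars.find.go] at h ⊢
    by_cases hp : sub.isPrefixOf (c :: t) = true
    · exact ⟨0, by simp [hp], by simpa using hp, by omega⟩
    · simp only [hp, Bool.false_eq_true, if_false] at h ⊢
      obtain ⟨j, hj, hpre, hmin⟩ := ih (k + 1) h
      refine ⟨j + 1, by rw [hj]; norm_num; ring_nf, by simpa using hpre, ?_⟩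
      intro i hi
      cases i with
      | zero => simpa using hp
      | succ i => simpa using hmin i (by omega)

theorem pvPrefix_bound {sub t : List Char} {p : Nat} (hsub : sub ≠ [])
    (h : sub.isPrefixOf (t.drop p) = true) : p + sub.length ≤ t.length := by
  have hle : sub.length ≤ (t.drop p).length :=
    (List.isPrefixOf_iff_prefix.mp h).length_le
  have h1 : 0 < sub.length := List.length_pos_of_ne_nil hsub
  simp only [List.length_drop] at hle
  omega

theorem pvFindFrom_bounds {sub : List Char} (t : List Char) (hsub : sub ≠ []) (cur : Int)
    (h : PySem.Chars.findFrom t sub cur ≠ -1) :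
    cur ≤ PySem.Chars.findFrom t sub cur ∧ 0 ≤ PySem.Chars.findFrom t sub cur ∧
      PySem.Chars.findFrom t sub cur + sub.length ≤ t.length := by
  simp only [PySem.Chars.findFrom, PySem.Chars.find, Int.toNat_natCast, List.take_length] at h ⊢
  by_cases h1 : (t.length : Int) < (if cur < 0 then if cur + ↑t.length < 0 then 0 else cur + ↑t.length else cur)
  · simp [h1] at h
  · simp only [h1, if_false] at h ⊢
    by_cases h2 : PySem.Chars.find.go sub (List.drop (if cur < 0 then if cur + ↑t.length < 0 then 0 else cur + ↑t.length else cur).toNat t) 0 = -1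
    · simp [h2] at h
    · simp only [h2, if_false] at h ⊢
      obtain ⟨j, hj, hpre, -⟩ := pvGo_first_match _ 0 h2
      have hb := pvPrefix_bound hsub (by simpa [List.drop_drop, Nat.add_comm] using hpre)
      rw [hj]
      split_ifs at hb ⊢ <;> push_cast at hb ⊢ <;> omega

-- port of A: the `while True` loop over (current_pos, count); PySem.Chars.findFrom = str.find(sub, start)
def pvLoopA (t s e : List Char) (hs : s ≠ []) (he : e ≠ []) (cur : Int) (count : Int) : Int :=
  if hsp : PySem.Chars.findFrom t s cur = -1 then count
  else if hep : PySem.Chars.findFrom t e (PySem.Chars.findFrom t s cur + (s.length : Int)) = -1 then count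
  else pvLoopA t s e hs he
    (PySem.Chars.findFrom t e (PySem.Chars.findFrom t s cur + (s.length : Int)) + (e.length : Int))
    (count + 1)
termination_by (t.length + 1 - cur).toNat
decreasing_by
  have h1 := pvFindFrom_bounds t hs cur hsp
  have h2 := pvFindFrom_bounds t he _ hep
  have hs1 : 0 < s.length := List.length_pos_of_ne_nil hs
  have he1 : 0 < e.length := List.length_pos_of_ne_nil he
  omega

def count_valid_tags (text : String) (tag : String) : Int :=
  if text.toList = [] then 0                                   -- if not text: return 0
  else pvLoopA text.toList ('<' :: (tag.toList ++ ['>'])) ('<' :: '/' :: (tag.toList ++ ['>']))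
    (List.cons_ne_nil _ _) (List.cons_ne_nil _ _) 0 0

-- ===== PORT B =====
-- port of B: one character-indexed scan with a want_end flag; startswith(token, pos) = isPrefixOf (drop pos)
def pvLoopB (t s e : List Char) (hs : s ≠ []) (he : e ≠ []) (pos : Nat) (wantEnd : Bool) (count : Int) : Int :=
  if h : pos < t.length then
    if (if wantEnd then e else s).isPrefixOf (t.drop pos) = true then
      pvLoopB t s e hs he (pos + (if wantEnd then e else s).length) (!wantEnd)
        (if wantEnd then count + 1 else count)
    else pvLoopB t s e hs he (pos + 1) wantEnd count
  else count
termination_by t.length - pos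
decreasing_by
  · have h1 : 0 < s.length := List.length_pos_of_ne_nil hs
    have h2 : 0 < e.length := List.length_pos_of_ne_nil he
    split <;> omega
  · omega

def count_valid_tags_alt (text : String) (tag : String) : Int :=
  pvLoopB text.toList ('<' :: (tag.toList ++ ['>'])) ('<' :: '/' :: (tag.toList ++ ['>']))
    (List.cons_ne_nil _ _) (List.cons_ne_nil _ _) 0 false 0


-- ===== PRECONDITION & SPEC =====
def Spec_count_valid_tags (text : String) (tag : String) (out : Int) : Prop := out = count_valid_tags_alt text tag
instance (text : String) (tag : String) (out : Int) : Decidable (Spec_count_valid_tags text tag out) := by unfold Spec_count_valid_tags; infer_instance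

-- ===== CLAIM (what is proved, stated in full; the proofs are below) =====
def Claim_equal_count_valid_tags : Prop := ∀ (text : String) (tag : String), Dom_count_valid_tags text tag → Spec_count_valid_tags text tag (count_valid_tags text tag)

-- ===== LEMMAS AND PROOFS =====

-- str.find(sub, pos) for a Nat pos ≤ len: either no occurrence of sub at or after pos, or its first occurrence
theorem pvGo_eq_neg_one_iff {sub : List Char} (hsub : sub ≠ []) (l : List Char) (k : Nat) :
    PySem.Chars.find.go sub l k = -1 ↔ ∀ j : Nat, ¬ sub.isPrefixOf (l.drop j) = true := by
  induction l generalizing k with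
  | nil =>
    simp only [PySem.Chars.find.go, List.isEmpty_iff, List.drop_nil]
    constructor
    · intro h j hp
      exact hsub (by simpa [List.isPrefixOf_iff_prefix] using hp)
    · intro h
      simp [hsub]
  | cons c t ih =>
    simp only [PySem.Chars.find.go]
    by_cases hp : sub.isPrefixOf (c :: t) = true
    · simp only [hp, if_true]
      constructor
      · intro h; omega
      · intro h; exact absurd hp (h 0)
    · simp only [hp, Bool.false_eq_true, if_false, ih]
      constructor
      · intro h j
        cases j with
        | zero => simpa using hp
        | succ j => simpa using h j
      · intro h j
        simpa using h (j + 1)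

theorem pvFindFrom_spec {sub : List Char} (t : List Char) (hsub : sub ≠ []) (pos : Nat)
    (hpos : pos ≤ t.length) :
    (PySem.Chars.findFrom t sub (pos : Int) = -1 ∧
      ∀ q : Nat, pos ≤ q → ¬ sub.isPrefixOf (t.drop q) = true)
    ∨ (∃ p : Nat, PySem.Chars.findFrom t sub (pos : Int) = (p : Int) ∧ pos ≤ p ∧
        sub.isPrefixOf (t.drop p) = true ∧
        ∀ q : Nat, pos ≤ q → q < p → ¬ sub.isPrefixOf (t.drop q) = true) := by
  have hst : ¬ ((pos : Int) < 0) := by omega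
  have hdrop : ∀ j : Nat, (List.drop pos t).drop j = t.drop (pos + j) := by
    intro j; rw [List.drop_drop, Nat.add_comm]
  have hnlt : ¬ ((t.length : Int) < (pos : Int)) := by omega
  simp only [PySem.Chars.findFrom, Int.toNat_natCast, List.take_length, hst, if_false,
    PySem.Chars.find, hnlt]
  by_cases hr : PySem.Chars.find.go sub (List.drop pos t) 0 = -1
  · left
    refine ⟨by simp [hr], ?_⟩
    intro q hq
    have := (pvGo_eq_neg_one_iff hsub (List.drop pos t) 0).mp hr (q - pos)
    rwa [hdrop, Nat.add_sub_cancel' hq] at this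
  · right
    obtain ⟨j, hj, hpre, hmin⟩ := pvGo_first_match (sub := sub) _ 0 hr
    rw [hdrop] at hpre
    refine ⟨pos + j, ?_, by omega, hpre, ?_⟩
    · simp only [hj]
      push_cast
      omega
    · intro q hq1 hq2
      have := hmin (q - pos) (by omega)
      rwa [hdrop, Nat.add_sub_cancel' hq1] at this

-- B's scan seeking token `tok = if wantEnd then e else s`:
-- no occurrence of tok at/after pos → the scan falls off the end unchanged
theorem pvLoopB_no (t s e : List Char) (hs : s ≠ []) (he : e ≠ []) (wantEnd : Bool) :
    ∀ pos count, (∀ q : Nat, pos ≤ q → ¬ (if wantEnd then e else s).isPrefixOf (t.drop q) = true) →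
      pvLoopB t s e hs he pos wantEnd count = count := by
  intro pos
  induction hn : t.length - pos using Nat.strong_induction_on generalizing pos with
  | _ n ih =>
    intro count hno
    rw [pvLoopB]
    by_cases hlt : pos < t.length
    · simp only [hlt, dite_true]
      have := hno pos le_rfl
      simp only [this, Bool.false_eq_true, if_false]
      exact ih (t.length - (pos + 1)) (by omega) (pos + 1) rfl count
        (fun q hq => hno q (by omega))
    · simp [hlt]

-- first occurrence of tok at p → the scan reaches p, consumes tok, flips the flag
theorem pvLoopB_seek (t s e : List Char) (hs : s ≠ []) (he : e ≠ []) (wantEnd : Bool) :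
    ∀ pos p count, pos ≤ p → (if wantEnd then e else s).isPrefixOf (t.drop p) = true →
      (∀ q : Nat, pos ≤ q → q < p → ¬ (if wantEnd then e else s).isPrefixOf (t.drop q) = true) →
      pvLoopB t s e hs he pos wantEnd count =
        pvLoopB t s e hs he (p + (if wantEnd then e else s).length) (!wantEnd)
          (if wantEnd then count + 1 else count) := by
  intro pos p
  induction hn : p - pos using Nat.strong_induction_on generalizing pos with
  | _ n ih =>
    intro count hle hpre hmin
    have htok : (if wantEnd then e else s) ≠ [] := by cases wantEnd <;> simpa
    have hb := pvPrefix_bound htok hpre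
    have htok1 : 0 < (if wantEnd then e else s).length := List.length_pos_of_ne_nil htok
    by_cases heq : pos = p
    · subst heq
      rw [pvLoopB]
      simp only [show pos < t.length by omega, dite_true, hpre, if_true]
    · have hlt : pos < p := by omega
      rw [pvLoopB]
      simp only [show pos < t.length by omega, dite_true,
        hmin pos le_rfl hlt, Bool.false_eq_true, if_false]
      exact ih (p - (pos + 1)) (by omega) (pos + 1) rfl count (by omega) hpre
        (fun q hq1 hq2 => hmin q (by omega) hq2)

-- main invariant: from any position (seeking a start tag), B's scan equals A's find-loop
theorem pvMain (t s e : List Char) (hs : s ≠ []) (he : e ≠ []) :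
    ∀ n pos count, t.length - pos ≤ n → pos ≤ t.length →
      pvLoopB t s e hs he pos false count = pvLoopA t s e hs he (pos : Int) count := by
  intro n
  induction n with
  | zero =>
    intro pos count hn hpos
    rcases pvFindFrom_spec t hs pos hpos with ⟨hA, hno⟩ | ⟨p, hp, hle, hpre, -⟩
    · rw [pvLoopA, dif_pos hA]
      exact pvLoopB_no t s e hs he false pos count (by simpa using hno)
    · have := pvPrefix_bound hs hpre
      have hs1 : 0 < s.length := List.length_pos_of_ne_nil hs
      omega
  | succ n ihn =>
    intro pos count hn hpos
    rcases pvFindFrom_spec t hs pos hpos with ⟨hA, hno⟩ | ⟨p, hp, hle, hpre, hmin⟩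
    · rw [pvLoopA, dif_pos hA]
      exact pvLoopB_no t s e hs he false pos count (by simpa using hno)
    · have hbp := pvPrefix_bound hs hpre
      have hs1 : 0 < s.length := List.length_pos_of_ne_nil hs
      have he1 : 0 < e.length := List.length_pos_of_ne_nil he
      have hB1 := pvLoopB_seek t s e hs he false pos p count hle (by simpa using hpre)
        (by simpa using hmin)
      simp only [Bool.false_eq_true, if_false, Bool.not_false] at hB1
      have hcast : PySem.Chars.findFrom t s (pos : Int) + (s.length : Int)
          = ((p + s.length : Nat) : Int) := by rw [hp]; push_cast; ring
      rw [pvLoopA, dif_neg (show ¬ PySem.Chars.findFrom t s (pos : Int) = -1 by rw [hp]; omega)]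
      simp only [hcast]
      rcases pvFindFrom_spec t he (p + s.length) hbp with ⟨hA2, hno2⟩ | ⟨r, hr, hle2, hpre2, hmin2⟩
      · rw [dif_pos hA2, hB1]
        exact pvLoopB_no t s e hs he true (p + s.length) count (by simpa using hno2)
      · have hbr := pvPrefix_bound he hpre2
        have hB2 := pvLoopB_seek t s e hs he true (p + s.length) r count hle2
          (by simpa using hpre2) (by simpa using hmin2)
        simp only [if_true, Bool.not_true] at hB2
        rw [dif_neg (show ¬ PySem.Chars.findFrom t e ((p + s.length : Nat) : Int) = -1 by rw [hr]; omega)]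
        rw [hB1, hB2, hr]
        rw [show ((r : Int) + (e.length : Int)) = ((r + e.length : Nat) : Int) by push_cast; ring]
        exact ihn (r + e.length) (count + 1) (by omega) (by omega)


-- ===== VERDICT (by name: the statement is the Claim_ definition above) =====
theorem count_valid_tags_spec : Claim_equal_count_valid_tags := by
  intro text tag _
  unfold Spec_count_valid_tags count_valid_tags count_valid_tags_alt
  by_cases hnil : text.toList = []
  · simp only [hnil, if_true]
    rw [pvLoopB]
    simp
  · simp only [hnil, if_false]
    exact (pvMain text.toList _ _ _ _ text.toList.length 0 0 (by omega) (by omega)).symm
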